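-- pv_equiv track=rewrite | github.com/JerryMouseZ/workflow | workflow/runner.py | _normalize_selectors
-- ===== SOURCE A (Python) =====
-- def _normalize_selectors(raw: list[str] | None) -> list[str]:
--     if not raw:
--         return []
--     out: list[str] = []
--     for item in raw:
--         if item is not None:
--             out.extend(tok.strip() for tok in str(item).split(",") if tok.strip())
--     return out
-- ===== SOURCE B (Python) =====
-- def _isws(ch):
--     return ch.isspace()
--
--
-- def _ltrim(cs):
--     if cs and _isws(cs[0]):
--         return _ltrim(cs[1:])
--     return cs
--
--
-- def _trim(cs):
--     return _ltrim(_ltrim(cs)[::-1])[::-1]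
--
--
-- def _normalize_selectors(raw):
--     if not raw:
--         return []
--     out = []
--     for item in raw:
--         if item is None:
--             continue
--         buf = []
--         for ch in str(item) + ',':
--             if ch == ',':
--                 tok = _trim(buf)
--                 if tok:
--                     out.append(''.join(tok))
--                 buf = []
--             else:
--                 buf.append(ch)
--     return out
-- ===== Notes on version B (the rewrite author's own statement) =====
-- stated objective: alternative
-- what changed: A calls str.split(',') and str.strip on each item inside a comprehension; B is a character-level state machine: it scans each item's characters once with a token buffer, flushing a hand-trimmed token at every comma (and at end of item), never calling split or strip.
import Mathlib
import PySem

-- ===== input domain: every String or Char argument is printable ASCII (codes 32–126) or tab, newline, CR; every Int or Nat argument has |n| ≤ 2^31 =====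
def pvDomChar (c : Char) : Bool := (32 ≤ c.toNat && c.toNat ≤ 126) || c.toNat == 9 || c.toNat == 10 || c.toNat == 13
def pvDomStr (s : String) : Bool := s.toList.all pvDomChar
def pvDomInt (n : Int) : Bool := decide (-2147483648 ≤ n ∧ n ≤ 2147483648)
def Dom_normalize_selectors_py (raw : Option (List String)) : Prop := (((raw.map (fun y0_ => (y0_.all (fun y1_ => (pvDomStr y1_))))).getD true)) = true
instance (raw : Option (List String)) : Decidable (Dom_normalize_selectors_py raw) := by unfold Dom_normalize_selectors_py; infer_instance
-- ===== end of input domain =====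

-- B replaces A's split/strip comprehension by a character-level state machine with a token
-- buffer (objective: alternative — same cost, genuinely different mechanism).

-- ===== PORT A =====
-- per-item loop: out.extend(tok.strip() for tok in item.split(",") if tok.strip())
-- (items are typed strings, so `item is not None` is always true and `str(item)` is the identity)
def normalize_selectors_py (raw : Option (List String)) : List String :=
  match raw with
  | none => []
  | some l =>
    if l = [] then []
    else
      l.foldl (fun out item =>
        out ++ ((PySem.Chars.splitOn item.toList [',']).filter
                  (fun tok => PySem.Chars.strip tok ≠ [])).map
                (fun tok => String.ofList (PySem.Chars.strip tok))) []

-- ===== PORT B =====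
-- _ltrim: drop leading Python-whitespace characters, recursively
def nsAlt_ltrim (cs : List Char) : List Char :=
  match cs with
  | c :: rest => if PySem.Chars.isspace c then nsAlt_ltrim rest else c :: rest
  | [] => []

-- _trim(cs) = reverse(_ltrim(reverse(_ltrim(cs))))
def nsAlt_trim (cs : List Char) : List Char :=
  (nsAlt_ltrim (nsAlt_ltrim cs).reverse).reverse

-- one step of the scanner: state = (buf, out); a comma flushes the trimmed buffer
def nsAlt_step (st : List Char × List String) (ch : Char) : List Char × List String :=
  if ch = ',' then
    let tok := nsAlt_trim st.1
    ([], if tok ≠ [] then st.2 ++ [String.ofList tok] else st.2)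
  else (st.1 ++ [ch], st.2)

def normalize_selectors_py_alt (raw : Option (List String)) : List String :=
  match raw with
  | none => []
  | some l =>
    if l = [] then []
    else
      l.foldl (fun out item =>
        ((item.toList ++ [',']).foldl nsAlt_step ([], out)).2) []

-- ===== PRECONDITION & SPEC =====
def Spec_normalize_selectors_py (raw : Option (List String)) (out : List String) : Prop := out = normalize_selectors_py_alt raw
instance (raw : Option (List String)) (out : List String) : Decidable (Spec_normalize_selectors_py raw out) := by unfold Spec_normalize_selectors_py; infer_instance

-- ===== CLAIM (what is proved, stated in full; the proofs are below) =====
def Claim_equal_normalize_selectors_py : Prop := ∀ (raw : Option (List String)), Dom_normalize_selectors_py raw → Spec_normalize_selectors_py raw (normalize_selectors_py raw)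

-- ===== LEMMAS AND PROOFS =====

-- B's hand-written trim equals Python's str.strip
lemma ltrim_eq_dropWhile (cs : List Char) :
    nsAlt_ltrim cs = List.dropWhile PySem.Chars.isspace cs := by
  induction cs with
  | nil => rfl
  | cons c rest ih => by_cases h : PySem.Chars.isspace c <;> simp [nsAlt_ltrim, List.dropWhile, h, ih]

lemma trim_eq_strip (cs : List Char) : nsAlt_trim cs = PySem.Chars.strip cs := by
  simp [nsAlt_trim, PySem.Chars.strip, PySem.Chars.lstrip, PySem.Chars.rstrip, ltrim_eq_dropWhile]

-- the string(s) one comma-field contributes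
def emitTok (b : List Char) : List String :=
  if nsAlt_trim b ≠ [] then [String.ofList (nsAlt_trim b)] else []

-- the strings contributed by the rest of an item, given the current buffer b
def emitAll (b : List Char) (cs : List Char) : List String :=
  match cs with
  | [] => emitTok b
  | c :: rest => if c = ',' then emitTok b ++ emitAll [] rest else emitAll (b ++ [c]) rest

-- B's inner scan computes emitAll
lemma scan_spec (cs : List Char) : ∀ (b : List Char) (o : List String),
    (cs ++ [',']).foldl nsAlt_step (b, o) = ([], o ++ emitAll b cs) := by
  induction cs with
  | nil =>
    intro b o
    simp only [List.nil_append, List.foldl_cons, List.foldl_nil, emitAll, nsAlt_step]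
    unfold emitTok; split_ifs <;> simp
  | cons c rest ih =>
    intro b o
    by_cases hc : c = ','
    · subst hc
      simp only [List.cons_append, List.foldl_cons]
      rw [show nsAlt_step (b, o) ',' = ([], o ++ emitTok b) by
        simp only [nsAlt_step]; unfold emitTok; split_ifs <;> simp]
      rw [ih]
      simp [emitAll, List.append_assoc]
    · simp only [List.cons_append, List.foldl_cons, nsAlt_step, hc, if_false, ih, emitAll]

-- filter-then-map of A's comprehension, as a flatMap of emitTok
lemma filter_map_eq_flatMap (S : List (List Char)) :
    (S.filter (fun tok => PySem.Chars.strip tok ≠ [])).map (fun tok => String.ofList (PySem.Chars.strip tok))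
      = S.flatMap (fun tok => emitTok tok) := by
  induction S with
  | nil => rfl
  | cons t S ih =>
    have he : emitTok t = if PySem.Chars.strip t ≠ [] then [String.ofList (PySem.Chars.strip t)] else [] := by
      simp [emitTok, trim_eq_strip]
    rw [List.flatMap_cons, he, ← ih]
    by_cases h : PySem.Chars.strip t = [] <;> simp [h]

-- PySem's fuel-based splitOn, filtered/stripped, computes emitAll
lemma go_spec : ∀ (fuel : Nat) (l cur : List Char) (acc : List (List Char)), l.length < fuel →
    (PySem.Chars.splitOn.go [','] fuel l cur acc).flatMap (fun tok => emitTok tok)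
      = acc.reverse.flatMap (fun tok => emitTok tok) ++ emitAll cur.reverse l := by
  intro fuel
  induction fuel with
  | zero => intro l cur acc h; omega
  | succ f ih =>
    intro l cur acc h
    cases l with
    | nil =>
      show ((cur.reverse :: acc).reverse).flatMap _ = _
      simp [emitAll]
    | cons x rest =>
      show (if [','].isPrefixOf (x :: rest) then
              PySem.Chars.splitOn.go [','] f (List.drop [','].length (x :: rest)) [] (cur.reverse :: acc)
            else PySem.Chars.splitOn.go [','] f rest (x :: cur) acc).flatMap _ = _
      by_cases hx : x = ','
      · subst hx
        simp only [List.isPrefixOf, BEq.rfl, Bool.true_and, if_pos, List.length_cons,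
          List.length_nil, List.drop_succ_cons, List.drop_zero]
        rw [ih rest [] (cur.reverse :: acc) (by simpa using Nat.lt_of_succ_lt_succ h)]
        simp [emitAll]
      · have hpre : ([','].isPrefixOf (x :: rest)) = false := by
          simp [List.isPrefixOf]
          exact fun hc => absurd hc.symm hx
        simp only [hpre, Bool.false_eq_true, if_false]
        rw [ih rest (x :: cur) acc (by simpa using Nat.lt_of_succ_lt_succ h)]
        simp [emitAll, hx]

lemma item_eq (cs : List Char) :
    ((PySem.Chars.splitOn cs [',']).filter (fun tok => PySem.Chars.strip tok ≠ [])).map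
        (fun tok => String.ofList (PySem.Chars.strip tok)) = emitAll [] cs := by
  rw [filter_map_eq_flatMap, PySem.Chars.splitOn, go_spec (cs.length + 1) cs [] [] (by omega)]
  simp

-- ===== VERDICT (by name: the statement is the Claim_ definition above) =====
theorem normalize_selectors_py_spec : Claim_equal_normalize_selectors_py := by
  intro raw _
  unfold Spec_normalize_selectors_py normalize_selectors_py normalize_selectors_py_alt
  cases raw with
  | none => rfl
  | some l =>
    by_cases hl : l = []
    · simp [hl]
    · simp only [hl, ite_false]
      have hfun : (fun (out : List String) (item : String) =>
          ((item.toList ++ [',']).foldl nsAlt_step ([], out)).2)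
          = fun out item => out ++ emitAll [] item.toList := by
        funext o i; rw [scan_spec]
      rw [hfun, PySem.List.foldl_append_eq_flatMap, PySem.List.foldl_append_eq_flatMap]
      exact List.flatMap_congr (fun item _ => item_eq item.toList)
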